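-- pv_equiv track=rewrite | github.com/KyuSahm/problems-solving | Implementation/python/key_and_lock.py | solution
-- ===== SOURCE A (Python) =====
-- def rotation(key):
--     m = len(key)
--     rotated_key = [[0] * m for _ in range(m)]
--     #tmp_key = copy.deepcopy(key)
--
--     for i in range(m):
--         for j in range(m):
--             rotated_key[j][m - 1 - i] = key[i][j]
--
--     return rotated_key
--
-- def check_key(key, lock):
--     m = len(key)
--     n = len(lock)
--
--     # shift_i from 0 to n + m -2
--     # shift_j from 0 to n + m -2
--     for shift_i in range(n + m - 1):
--         for shift_j in range(n + m - 1):
--             matched = True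
--             x = m - 1 - shift_i
--             y = m - 1 - shift_j
--             for i in range(n):
--                 for j in range(n):
--                     if (x + i >= 0 and x + i <= m - 1 and
--                         y + j >= 0 and y + j <= m - 1):
--                        key_value = key[x + i][y + j]
--                     else:
--                        key_value = 0
--                     key_result = key_value + lock[i][j]
--
--                     if key_result != 1:
--                         matched = False
--                         break
--                 if not matched:
--                     break
--             if matched:
--                 return True
--     return False
--
-- def solution(key, lock):
--     # Check key without rotation
--     answer = check_key(key, lock)
--
--     if answer:
--         return answer
--
--     # Check key with 90, 180, 270 degree
--     for _ in range(3):
--         key = rotation(key)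
--         answer = check_key(key, lock)
--
--         if answer:
--             return answer
--
--     return answer
-- ===== SOURCE B (Python) =====
-- def solution(key, lock):
--     m, n = len(key), len(lock)
--     # lock cells that are not already 1; every one of them must fall under the key window,
--     # which is equivalent to the window containing their bounding box
--     bad = [(i, j) for i in range(n) for j in range(n) if lock[i][j] != 1]
--     boxed = bool(bad)
--     if boxed:
--         lo_i = min(i for i, j in bad)
--         hi_i = max(i for i, j in bad)
--         lo_j = min(j for i, j in bad)
--         hi_j = max(j for i, j in bad)
--
--     def val(r, p, q):  # value of the key rotated r times, by index arithmetic (no grids built)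
--         if r == 0:
--             return key[p][q]
--         if r == 1:
--             return key[m - 1 - q][p]
--         if r == 2:
--             return key[m - 1 - p][m - 1 - q]
--         return key[q][m - 1 - p]
--
--     for r in range(4):
--         for s in range(n + m - 1):
--             for t in range(n + m - 1):
--                 dr, dc = s - (m - 1), t - (m - 1)
--                 if boxed and not (dr <= lo_i and hi_i < dr + m and dc <= lo_j and hi_j < dc + m):
--                     continue
--                 if all(val(r, p, q) + lock[p + dr][q + dc] == 1
--                        for p in range(m) for q in range(m)
--                        if 0 <= p + dr < n and 0 <= q + dc < n):
--                     return True
--     return False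
-- ===== Notes on version B (the rewrite author's own statement) =====
-- stated objective: faster
-- what changed: Replaces A's per-offset full n x n lock scan and materialized rotation grids with a precomputed bounding box of the lock cells != 1 (O(1) window test per offset) plus a key-indexed m x m scan of the overlap, with each rotation read off by index arithmetic instead of building rotated grids.
-- outside the precondition, e.g. on solution([[0]], [[4, 5], [3]]): A returns False, B raises IndexError; on solution([[1]], [[5], [1, 1]]): A returns False, B raises IndexError
import Mathlib
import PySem

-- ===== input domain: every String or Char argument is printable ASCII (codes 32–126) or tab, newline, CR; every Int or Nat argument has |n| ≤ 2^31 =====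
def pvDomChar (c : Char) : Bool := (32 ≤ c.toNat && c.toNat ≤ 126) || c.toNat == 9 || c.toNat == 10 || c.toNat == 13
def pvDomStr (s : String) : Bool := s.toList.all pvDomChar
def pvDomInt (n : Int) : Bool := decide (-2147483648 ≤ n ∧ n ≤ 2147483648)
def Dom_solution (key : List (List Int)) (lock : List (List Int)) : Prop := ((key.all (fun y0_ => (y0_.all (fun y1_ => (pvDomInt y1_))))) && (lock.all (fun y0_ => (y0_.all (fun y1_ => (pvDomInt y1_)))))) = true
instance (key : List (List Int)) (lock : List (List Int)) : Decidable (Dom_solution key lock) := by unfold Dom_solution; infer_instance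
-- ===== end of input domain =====

-- B drops A's per-offset full lock scan and its materialized rotation grids: it precomputes the
-- bounding box of the lock cells ≠ 1 (which the key window must contain — an O(1) test per offset)
-- and scans only the key-sized overlap, reading each rotation by index arithmetic; measured faster
-- in a timing run; return values proved equal on square inputs (Pre_).

-- ===== PORT A =====
-- A's rotation: double assignment loop over a zero grid (indices are in range on Pre_ inputs).
def rotationA (key : List (List Int)) : List (List Int) :=
  let m := key.length
  (PySem.List.pyRange 0 (m : Int) 1).foldl (fun rk i =>
    (PySem.List.pyRange 0 (m : Int) 1).foldl (fun rk j =>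
      PySem.List.pySetD rk j
        (PySem.List.pySetD (PySem.List.pyGetD rk j []) ((m : Int) - 1 - i)
          (PySem.List.pyGetD (PySem.List.pyGetD key i []) j 0))) rk)
    (List.replicate m (List.replicate m (0 : Int)))

-- A's check_key: the break-out flag loops become any/all over the same ranges.
-- pyGetD is exact here: on Pre_ inputs every index taken is in range (Python raises otherwise).
def check_key (key lock : List (List Int)) : Bool :=
  let m : Int := key.length
  let n : Int := lock.length
  (PySem.List.pyRange 0 (n + m - 1) 1).any fun shift_i =>
    (PySem.List.pyRange 0 (n + m - 1) 1).any fun shift_j =>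
      let x := m - 1 - shift_i
      let y := m - 1 - shift_j
      (PySem.List.pyRange 0 n 1).all fun i =>
        (PySem.List.pyRange 0 n 1).all fun j =>
          let kv : Int := if 0 ≤ x + i ∧ x + i ≤ m - 1 ∧ 0 ≤ y + j ∧ y + j ≤ m - 1
            then PySem.List.pyGetD (PySem.List.pyGetD key (x + i) []) (y + j) 0 else 0
          kv + PySem.List.pyGetD (PySem.List.pyGetD lock i []) j 0 == 1

-- A's 'for _ in range(3): key = rotation(key); …; if answer: return answer' loop.
def solGo (lock : List (List Int)) : Nat → List (List Int) → Bool → Bool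
  | 0, _, answer => answer
  | fuel + 1, key, _ =>
    let key' := rotationA key
    let ans := check_key key' lock
    if ans then ans else solGo lock fuel key' ans

def solution (key : List (List Int)) (lock : List (List Int)) : Bool :=
  let answer := check_key key lock
  if answer then answer else solGo lock 3 key answer

-- ===== PORT B =====
-- Source B's bad list: coordinates of the lock cells that are not already 1
def badList (lock : List (List Int)) (n : Nat) : List (Nat × Nat) :=
  (List.range n).flatMap fun i => (List.range n).filterMap fun j =>
    if (lock.getD i []).getD j 0 ≠ 1 then some (i, j) else none

-- Source B's val(r, p, q): the key rotated r times, read off by index arithmetic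
def valB (key : List (List Int)) (m r p q : Nat) : Int :=
  if r = 0 then (key.getD p []).getD q 0
  else if r = 1 then (key.getD (m - 1 - q) []).getD p 0
  else if r = 2 then (key.getD (m - 1 - p) []).getD (m - 1 - q) 0
  else (key.getD q []).getD (m - 1 - p) 0

-- Source B's bounding box of the bad cells: (lo_i, hi_i, lo_j, hi_j), none when bad is empty
def boxOf (bad : List (Nat × Nat)) : Option (Nat × Nat × Nat × Nat) :=
  match (bad.map Prod.fst).min?, (bad.map Prod.fst).max?,
        (bad.map Prod.snd).min?, (bad.map Prod.snd).max? with
  | some loI, some hiI, some loJ, some hiJ => some (loI, hiI, loJ, hiJ)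
  | _, _, _, _ => none

-- Source B's per-offset window test: the window must contain the bounding box (vacuous if no bad cell)
def winOK (box : Option (Nat × Nat × Nat × Nat)) (m : Nat) (dr dc : Int) : Bool :=
  match box with
  | none => true
  | some (loI, hiI, loJ, hiJ) =>
    decide (dr ≤ (loI : Int) ∧ (hiI : Int) < dr + m ∧ dc ≤ (loJ : Int) ∧ (hiJ : Int) < dc + m)

-- the body of Source B's offset loop: bounding box under the window, and the overlap checked key-side
def offBody (lock : List (List Int)) (box : Option (Nat × Nat × Nat × Nat)) (m n : Nat)
    (f : Nat → Nat → Int) (s t : Nat) : Bool :=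
  let dr : Int := (s : Int) - ((m : Int) - 1)
  let dc : Int := (t : Int) - ((m : Int) - 1)
  winOK box m dr dc &&
  ((List.range m).all fun p => (List.range m).all fun q =>
    if 0 ≤ (p : Int) + dr ∧ (p : Int) + dr < (n : Int) ∧ 0 ≤ (q : Int) + dc ∧ (q : Int) + dc < (n : Int) then
      f p q + (lock.getD ((p : Int) + dr).toNat []).getD ((q : Int) + dc).toNat 0 == 1
    else true)

def solution_alt (key : List (List Int)) (lock : List (List Int)) : Bool :=
  let m := key.length
  let n := lock.length
  let box := boxOf (badList lock n)
  (List.range 4).any fun r =>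
    (List.range (n + m - 1)).any fun s =>
      (List.range (n + m - 1)).any fun t =>
        offBody lock box m n (valB key m r) s t

-- ===== PRECONDITION & SPEC =====
-- Pre_ restricts to the problem's natural domain: a square key and a square lock. On ragged grids
-- both Pythons raise IndexError except when A's early mismatch break happens to skip the
-- out-of-range access; those accidental returns are excluded with the rest (see cites).
def Pre_solution (key : List (List Int)) (lock : List (List Int)) : Prop :=
  (∀ row ∈ key, row.length = key.length) ∧ (∀ row ∈ lock, row.length = lock.length)
instance (key : List (List Int)) (lock : List (List Int)) : Decidable (Pre_solution key lock) := by
  unfold Pre_solution; infer_instance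
def pvWitness_solution : List (List Int) × List (List Int) := ([[1, 0], [0, 0]], [[0]])

def Spec_solution (key : List (List Int)) (lock : List (List Int)) (out : Bool) : Prop := out = solution_alt key lock
instance (key : List (List Int)) (lock : List (List Int)) (out : Bool) : Decidable (Spec_solution key lock out) := by unfold Spec_solution; infer_instance

-- ===== CLAIM (what is proved, stated in full; the proofs are below) =====
def Claim_equal_solution : Prop := ∀ (key : List (List Int)) (lock : List (List Int)), Dom_solution key lock → Pre_solution key lock → Spec_solution key lock (solution key lock)

-- ===== LEMMAS AND PROOFS =====

-- the grid form of A's rotation, used only to relate rotationA to valB's index formulas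
def rotB (g : List (List Int)) : List (List Int) :=
  let m := g.length
  (List.range m).map fun r => (List.range m).map fun c => (g.getD (m - 1 - c) []).getD r 0

-- getD after set, in the combination the rotation invariant needs
theorem getD_set_eq {α : Type} (l : List α) (n r : Nat) (a d : α) :
    (l.set n a).getD r d = if n = r ∧ r < l.length then a else l.getD r d := by
  simp only [List.getD_eq_getElem?_getD, List.getElem?_set]
  split_ifs with h1 h2 h3 <;> simp_all

-- one Python assignment 'rotated_key[j][m-1-i] = key[i][j]' in Nat form
def rotStep (key : List (List Int)) (m : Nat) (rk : List (List Int)) (i j : Nat) : List (List Int) :=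
  rk.set j ((rk.getD j []).set (m - 1 - i) ((key.getD i []).getD j 0))

-- the body of the outer loop of A's rotation
def rotOuter (key : List (List Int)) (m : Nat) (st : List (List Int)) (i : Nat) : List (List Int) :=
  (List.range m).foldl (fun rk j => rotStep key m rk i j) st

theorem rotA_natFoldl (key : List (List Int)) :
    rotationA key =
      (List.range key.length).foldl (rotOuter key key.length)
        (List.replicate key.length (List.replicate key.length (0 : Int))) := by
  simp only [rotationA]
  rw [PySem.List.pyRange_zero_natCast, List.foldl_map]
  refine PySem.List.foldl_congr_mem _ _ _ _ ?_
  intro st i hi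
  rw [List.foldl_map, rotOuter]
  refine PySem.List.foldl_congr_mem _ _ _ _ ?_
  intro rk j hj
  rw [List.mem_range] at hi hj
  have hidx : (key.length : Int) - 1 - (i : Int) = ((key.length - 1 - i : Nat) : Int) := by omega
  rw [hidx]
  simp only [PySem.List.pyGetD_natCast, PySem.List.pySetD_natCast]
  rfl

theorem inner_len (key : List (List Int)) (m i : Nat) :
    ∀ (k : Nat) (st : List (List Int)),
      ((List.range k).foldl (fun rk j => rotStep key m rk i j) st).length = st.length := by
  intro k
  induction k with
  | zero => intro st; simp
  | succ k ih =>
    intro st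
    rw [List.range_succ, List.foldl_append]
    simp only [List.foldl_cons, List.foldl_nil]
    rw [rotStep, List.length_set]
    exact ih st

theorem inner_getD (key : List (List Int)) (m i : Nat) :
    ∀ (k : Nat) (st : List (List Int)) (r : Nat),
      ((List.range k).foldl (fun rk j => rotStep key m rk i j) st).getD r [] =
        if r < k then (st.getD r []).set (m - 1 - i) ((key.getD i []).getD r 0)
        else st.getD r [] := by
  intro k
  induction k with
  | zero => intro st r; simp
  | succ k ih =>
    intro st r
    rw [List.range_succ, List.foldl_append]
    simp only [List.foldl_cons, List.foldl_nil]
    rw [rotStep, getD_set_eq, inner_len, ih st k, ih st r]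
    rw [if_neg (Nat.lt_irrefl k)]
    by_cases hr : r < k
    · rw [if_neg (by omega : ¬(k = r ∧ r < st.length)), if_pos hr, if_pos (by omega)]
    · by_cases hk : r = k
      · subst hk
        by_cases hlen : r < st.length
        · rw [if_pos ⟨rfl, hlen⟩, if_pos (by omega)]
        · rw [if_neg (by tauto), if_neg hr, if_pos (by omega)]
          have e : st.getD r [] = [] := List.getD_eq_default _ _ (by omega)
          rw [e]
          simp
      · rw [if_neg (by tauto), if_neg hr, if_neg (by omega)]

theorem outer_len (key : List (List Int)) (m : Nat) :
    ∀ (t : Nat),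
      ((List.range t).foldl (rotOuter key m) (List.replicate m (List.replicate m (0 : Int)))).length = m := by
  intro t
  induction t with
  | zero => simp
  | succ t ih =>
    rw [List.range_succ, List.foldl_append]
    simp only [List.foldl_cons, List.foldl_nil]
    rw [rotOuter, inner_len]
    exact ih

theorem outer_getD (key : List (List Int)) (m : Nat) :
    ∀ (t : Nat), t ≤ m → ∀ (r : Nat),
      ((List.range t).foldl (rotOuter key m) (List.replicate m (List.replicate m (0 : Int)))).getD r [] =
        if r < m then
          (List.range m).map (fun c => if m - t ≤ c then (key.getD (m - 1 - c) []).getD r 0 else 0)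
        else [] := by
  intro t
  induction t with
  | zero =>
    intro _ r
    simp only [List.range_zero, List.foldl_nil]
    by_cases hr : r < m
    · rw [if_pos hr, List.getD_eq_getElem _ _ (by simpa using hr)]
      simp only [List.getElem_replicate]
      refine List.ext_getElem (by simp) ?_
      intro c h1 h2
      simp only [List.getElem_replicate, List.getElem_map, List.getElem_range]
      rw [if_neg (by simp at h1; omega)]
    · rw [if_neg hr, List.getD_eq_default _ _ (by simpa using hr)]
  | succ t ih =>
    intro ht r
    rw [List.range_succ, List.foldl_append]
    simp only [List.foldl_cons, List.foldl_nil]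
    rw [rotOuter, inner_getD key m t m, ih (by omega) r]
    by_cases hr : r < m
    · rw [if_pos hr, if_pos hr, if_pos hr]
      refine List.ext_getElem (by simp) ?_
      intro c h1 h2
      have hcm : c < m := by simp at h2; omega
      simp only [List.getElem_set, List.getElem_map, List.getElem_range]
      by_cases hc : m - 1 - t = c
      · rw [if_pos hc, ← hc, show m - 1 - (m - 1 - t) = t from by omega,
            if_pos (by omega)]
      · rw [if_neg hc]
        by_cases h2c : m - t ≤ c
        · rw [if_pos h2c, if_pos (by omega)]
        · rw [if_neg h2c, if_neg (by omega)]
    · rw [if_neg hr, if_neg hr, if_neg hr]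

theorem rotB_len (g : List (List Int)) : (rotB g).length = g.length := by
  simp [rotB]

theorem rot_eq (key : List (List Int)) : rotationA key = rotB key := by
  rw [rotA_natFoldl]
  simp only [rotB]
  refine List.ext_getElem (by rw [outer_len]; simp) ?_
  intro r h1 h2
  have hr : r < key.length := by simpa using h2
  rw [show ((List.range key.length).foldl (rotOuter key key.length)
        (List.replicate key.length (List.replicate key.length (0 : Int))))[r] =
      ((List.range key.length).foldl (rotOuter key key.length)
        (List.replicate key.length (List.replicate key.length (0 : Int)))).getD r []
    from (List.getD_eq_getElem _ _ h1).symm]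
  rw [outer_getD key key.length key.length (Nat.le_refl _) r, if_pos hr]
  rw [List.getElem_map, List.getElem_range]
  refine List.map_congr_left ?_
  intro c hc
  rw [if_pos (by omega)]

theorem rotB_getD (g : List (List Int)) (p q : Nat) (hp : p < g.length) (hq : q < g.length) :
    ((rotB g).getD p []).getD q 0 = (g.getD (g.length - 1 - q) []).getD p 0 := by
  simp only [rotB]
  rw [PySem.List.getD_map_range _ _ _ _ hp, PySem.List.getD_map_range _ _ _ _ hq]

theorem list_any_congr {α : Type} (l : List α) {p q : α → Bool} (h : ∀ x ∈ l, p x = q x) :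
    l.any p = l.any q := by
  induction l with
  | nil => rfl
  | cons x xs ih =>
    simp only [List.any_cons]
    rw [h x (by simp), ih (fun y hy => h y (by simp [hy]))]

theorem mem_badList (lock : List (List Int)) (n : Nat) (i j : Nat) :
    (i, j) ∈ badList lock n ↔ i < n ∧ j < n ∧ (lock.getD i []).getD j 0 ≠ 1 := by
  simp only [badList, List.mem_flatMap, List.mem_filterMap, List.mem_range]
  constructor
  · rintro ⟨i', hi', j', hj', hij⟩
    by_cases hb : (lock.getD i' []).getD j' 0 ≠ 1
    · rw [if_pos hb, Option.some.injEq, Prod.mk.injEq] at hij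
      obtain ⟨rfl, rfl⟩ := hij
      exact ⟨hi', hj', hb⟩
    · rw [if_neg hb] at hij; cases hij
  · rintro ⟨hi, hj, hb⟩
    exact ⟨i, hi, j, hj, by rw [if_pos hb]⟩

theorem winOK_iff (bad : List (Nat × Nat)) (m : Nat) (dr dc : Int) :
    winOK (boxOf bad) m dr dc = true ↔
      ∀ ij ∈ bad, dr ≤ (ij.1 : Int) ∧ (ij.1 : Int) < dr + (m : Int) ∧
        dc ≤ (ij.2 : Int) ∧ (ij.2 : Int) < dc + (m : Int) := by
  by_cases hb : bad = []
  · simp [hb, boxOf, winOK]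
  · have hfst : bad.map Prod.fst ≠ [] := by simpa using hb
    have hsnd : bad.map Prod.snd ≠ [] := by simpa using hb
    obtain ⟨loI, hloI⟩ : ∃ a, (bad.map Prod.fst).min? = some a := by
      cases hm : (bad.map Prod.fst).min? with
      | none => exact absurd (List.min?_eq_none_iff.mp hm) hfst
      | some a => exact ⟨a, rfl⟩
    obtain ⟨hiI, hhiI⟩ : ∃ a, (bad.map Prod.fst).max? = some a := by
      cases hm : (bad.map Prod.fst).max? with
      | none => exact absurd (List.max?_eq_none_iff.mp hm) hfst
      | some a => exact ⟨a, rfl⟩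
    obtain ⟨loJ, hloJ⟩ : ∃ a, (bad.map Prod.snd).min? = some a := by
      cases hm : (bad.map Prod.snd).min? with
      | none => exact absurd (List.min?_eq_none_iff.mp hm) hsnd
      | some a => exact ⟨a, rfl⟩
    obtain ⟨hiJ, hhiJ⟩ : ∃ a, (bad.map Prod.snd).max? = some a := by
      cases hm : (bad.map Prod.snd).max? with
      | none => exact absurd (List.max?_eq_none_iff.mp hm) hsnd
      | some a => exact ⟨a, rfl⟩
    obtain ⟨hloIm, hloIle⟩ := List.min?_eq_some_iff.mp hloI
    obtain ⟨hhiIm, hhiIle⟩ := List.max?_eq_some_iff.mp hhiI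
    obtain ⟨hloJm, hloJle⟩ := List.min?_eq_some_iff.mp hloJ
    obtain ⟨hhiJm, hhiJle⟩ := List.max?_eq_some_iff.mp hhiJ
    have hbox : boxOf bad = some (loI, hiI, loJ, hiJ) := by
      simp [boxOf, hloI, hhiI, hloJ, hhiJ]
    rw [hbox]
    simp only [winOK, decide_eq_true_eq]
    constructor
    · rintro ⟨w1, w2, w3, w4⟩ ⟨i, j⟩ hm
      have h1 := hloIle _ (List.mem_map_of_mem hm)
      have h2 := hhiIle _ (List.mem_map_of_mem hm)
      have h3 := hloJle _ (List.mem_map_of_mem hm)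
      have h4 := hhiJle _ (List.mem_map_of_mem hm)
      dsimp only at h1 h2 h3 h4 ⊢
      omega
    · intro h
      obtain ⟨a1, ha1m, ha1⟩ := List.mem_map.mp hloIm
      obtain ⟨a2, ha2m, ha2⟩ := List.mem_map.mp hhiIm
      obtain ⟨a3, ha3m, ha3⟩ := List.mem_map.mp hloJm
      obtain ⟨a4, ha4m, ha4⟩ := List.mem_map.mp hhiJm
      have k1 := (h a1 ha1m).1
      have k2 := (h a2 ha2m).2.1
      have k3 := (h a3 ha3m).2.2.1
      have k4 := (h a4 ha4m).2.2.2
      rw [ha1] at k1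
      rw [ha2] at k2
      rw [ha3] at k3
      rw [ha4] at k4
      exact ⟨k1, k2, k3, k4⟩

theorem check_eq (g lock : List (List Int)) (m n : Nat)
    (hg : g.length = m) (hlock : lock.length = n)
    (f : Nat → Nat → Int)
    (hf : ∀ p q, p < m → q < m → (g.getD p []).getD q 0 = f p q) :
    check_key g lock =
      (List.range (n + m - 1)).any fun s =>
        (List.range (n + m - 1)).any fun t => offBody lock (boxOf (badList lock n)) m n f s t := by
  rcases Nat.eq_zero_or_pos (n + m) with h0 | hpos
  · have hn : n = 0 := by omega
    have hm : m = 0 := by omega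
    simp [check_key, hg, hlock, hn, hm, PySem.List.pyRange]
  · have hNM : (n : Int) + (m : Int) - 1 = ((n + m - 1 : Nat) : Int) := by omega
    simp only [check_key, hg, hlock, hNM, PySem.List.pyRange_zero_natCast, List.any_map,
      List.all_map]
    refine list_any_congr _ ?_
    intro s hs
    simp only [Function.comp_apply]
    refine list_any_congr _ ?_
    intro t ht
    simp only [Function.comp_apply]
    rw [List.mem_range] at hs ht
    rw [Bool.eq_iff_iff]
    simp only [offBody, winOK_iff, List.all_eq_true, Bool.and_eq_true, List.mem_range,
      beq_iff_eq, Function.comp_apply]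
    constructor
    · intro h
      refine ⟨?_, ?_⟩
      · rintro ⟨i, j⟩ hmem
        rw [mem_badList] at hmem
        obtain ⟨hi, hj, hbad⟩ := hmem
        have hcond := h i hi j hj
        dsimp only
        by_cases hG : 0 ≤ (m : Int) - 1 - (s : Int) + (i : Int) ∧ (m : Int) - 1 - (s : Int) + (i : Int) ≤ (m : Int) - 1 ∧
            0 ≤ (m : Int) - 1 - (t : Int) + (j : Int) ∧ (m : Int) - 1 - (t : Int) + (j : Int) ≤ (m : Int) - 1
        · omega
        · rw [if_neg hG] at hcond
          have hL : PySem.List.pyGetD (PySem.List.pyGetD lock (i : Int) []) (j : Int) 0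
              = (lock.getD i []).getD j 0 := by
            simp [PySem.List.pyGetD_natCast]
          rw [hL] at hcond
          exact absurd (by omega) hbad
      · intro p hp q hq
        split_ifs with hguard
        · obtain ⟨g1, g2, g3, g4⟩ := hguard
          set i : Nat := ((p : Int) + ((s : Int) - ((m : Int) - 1))).toNat with hi
          set j : Nat := ((q : Int) + ((t : Int) - ((m : Int) - 1))).toNat with hj
          have hiv : (i : Int) = (p : Int) + ((s : Int) - ((m : Int) - 1)) := Int.toNat_of_nonneg g1
          have hjv : (j : Int) = (q : Int) + ((t : Int) - ((m : Int) - 1)) := Int.toNat_of_nonneg g3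
          have hin : i < n := by omega
          have hjn : j < n := by omega
          have hcond := h i hin j hjn
          rw [if_pos (by omega)] at hcond
          rw [show (m : Int) - 1 - (s : Int) + (i : Int) = ((p : Nat) : Int) from by omega,
              show (m : Int) - 1 - (t : Int) + (j : Int) = ((q : Nat) : Int) from by omega,
              PySem.List.pyGetD_natCast, PySem.List.pyGetD_natCast,
              PySem.List.pyGetD_natCast, PySem.List.pyGetD_natCast,
              hf p q hp hq] at hcond
          simp only [beq_iff_eq]
          exact hcond
        · rfl
    · rintro ⟨h1, h2⟩
      intro i hi j hj
      by_cases hw : 0 ≤ (m : Int) - 1 - (s : Int) + (i : Int) ∧ (m : Int) - 1 - (s : Int) + (i : Int) ≤ (m : Int) - 1 ∧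
          0 ≤ (m : Int) - 1 - (t : Int) + (j : Int) ∧ (m : Int) - 1 - (t : Int) + (j : Int) ≤ (m : Int) - 1
      · rw [if_pos hw]
        obtain ⟨w1, w2, w3, w4⟩ := hw
        set p : Nat := ((m : Int) - 1 - (s : Int) + (i : Int)).toNat with hp
        set q : Nat := ((m : Int) - 1 - (t : Int) + (j : Int)).toNat with hq
        have hpv : (p : Int) = (m : Int) - 1 - (s : Int) + (i : Int) := Int.toNat_of_nonneg w1
        have hqv : (q : Int) = (m : Int) - 1 - (t : Int) + (j : Int) := Int.toNat_of_nonneg w3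
        have hpm : p < m := by omega
        have hqm : q < m := by omega
        have hcond := h2 p hpm q hqm
        rw [if_pos (by omega)] at hcond
        rw [show ((p : Nat) : Int) + ((s : Int) - ((m : Int) - 1)) = ((i : Nat) : Int) from by omega,
            show ((q : Nat) : Int) + ((t : Int) - ((m : Int) - 1)) = ((j : Nat) : Int) from by omega,
            Int.toNat_natCast, Int.toNat_natCast, ← hf p q hpm hqm, beq_iff_eq] at hcond
        rw [← hpv, ← hqv, PySem.List.pyGetD_natCast, PySem.List.pyGetD_natCast,
            PySem.List.pyGetD_natCast, PySem.List.pyGetD_natCast]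
        exact hcond
      · rw [if_neg hw]
        by_cases hbad : (lock.getD i []).getD j 0 ≠ 1
        · exfalso
          have hh := h1 (i, j) ((mem_badList lock n i j).mpr ⟨hi, hj, hbad⟩)
          dsimp only at hh
          omega
        · simp only [ne_eq, not_not] at hbad
          rw [show PySem.List.pyGetD (PySem.List.pyGetD lock (i : Int) []) (j : Int) 0
                = (lock.getD i []).getD j 0 from by
              simp [PySem.List.pyGetD_natCast], hbad]
          ring

theorem solGo_succ (lock : List (List Int)) (fuel : Nat) (key : List (List Int)) (a : Bool) :
    solGo lock (fuel + 1) key a =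
      (if check_key (rotationA key) lock then check_key (rotationA key) lock
       else solGo lock fuel (rotationA key) (check_key (rotationA key) lock)) := rfl

theorem solGo_zero (lock : List (List Int)) (key : List (List Int)) (a : Bool) :
    solGo lock 0 key a = a := rfl

theorem sol_unfold (key lock : List (List Int)) :
    solution key lock =
      (check_key key lock ||
        (check_key (rotationA key) lock ||
          (check_key (rotationA (rotationA key)) lock ||
            check_key (rotationA (rotationA (rotationA key))) lock))) := by
  show (if check_key key lock then check_key key lock else solGo lock 3 key (check_key key lock)) = _
  rw [show (3 : Nat) = 2 + 1 from rfl, solGo_succ, show (2 : Nat) = 1 + 1 from rfl, solGo_succ,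
      show (1 : Nat) = 0 + 1 from rfl, solGo_succ, solGo_zero]
  cases check_key key lock <;> cases check_key (rotationA key) lock <;>
    cases check_key (rotationA (rotationA key)) lock <;>
    cases check_key (rotationA (rotationA (rotationA key))) lock <;> simp_all

theorem hf0 (key : List (List Int)) :
    ∀ p q, p < key.length → q < key.length →
      (key.getD p []).getD q 0 = valB key key.length 0 p q := by
  intro p q _ _; simp [valB]

theorem hf1 (key : List (List Int)) :
    ∀ p q, p < key.length → q < key.length →
      ((rotB key).getD p []).getD q 0 = valB key key.length 1 p q := by
  intro p q hp hq
  rw [rotB_getD key p q hp hq]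
  simp [valB]

theorem hf2 (key : List (List Int)) :
    ∀ p q, p < key.length → q < key.length →
      ((rotB (rotB key)).getD p []).getD q 0 = valB key key.length 2 p q := by
  intro p q hp hq
  rw [rotB_getD (rotB key) p q (by rw [rotB_len]; exact hp) (by rw [rotB_len]; exact hq),
      rotB_len,
      rotB_getD key (key.length - 1 - q) p (by omega) hp]
  simp [valB]

theorem hf3 (key : List (List Int)) :
    ∀ p q, p < key.length → q < key.length →
      ((rotB (rotB (rotB key))).getD p []).getD q 0 = valB key key.length 3 p q := by
  intro p q hp hq
  rw [rotB_getD (rotB (rotB key)) p q (by rw [rotB_len, rotB_len]; exact hp)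
        (by rw [rotB_len, rotB_len]; exact hq),
      rotB_len, rotB_len,
      rotB_getD (rotB key) (key.length - 1 - q) p (by rw [rotB_len]; omega)
        (by rw [rotB_len]; exact hp),
      rotB_len,
      rotB_getD key (key.length - 1 - p) (key.length - 1 - q) (by omega) (by omega),
      show key.length - 1 - (key.length - 1 - q) = q from by omega]
  simp [valB]

-- ===== VERDICT (by name: the statement is the Claim_ definition above) =====
theorem solution_spec : Claim_equal_solution := by
  intro key lock _ _
  unfold Spec_solution
  rw [sol_unfold, rot_eq key, rot_eq (rotB key), rot_eq (rotB (rotB key))]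
  simp only [solution_alt, show List.range 4 = [0, 1, 2, 3] from rfl, List.any_cons,
    List.any_nil, Bool.or_false]
  rw [check_eq key lock key.length lock.length rfl rfl (valB key key.length 0) (hf0 key),
      check_eq (rotB key) lock key.length lock.length (rotB_len key) rfl
        (valB key key.length 1) (hf1 key),
      check_eq (rotB (rotB key)) lock key.length lock.length
        (by rw [rotB_len, rotB_len]) rfl (valB key key.length 2) (hf2 key),
      check_eq (rotB (rotB (rotB key))) lock key.length lock.length
        (by rw [rotB_len, rotB_len, rotB_len]) rfl (valB key key.length 3) (hf3 key)]
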